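-- pv_equiv track=rewrite | github.com/morirori/ProcessMining | utils.py | extract_important_words
-- ===== SOURCE A (Python) =====
-- def extract_important_words(sentences):
--     parsed_sentences = []
--     for sentence in sentences:
--         parsed_sentance = []
--         for word in sentence:
--             if word[0] == "and":
--                 parsed_sentences.append(parsed_sentance)
--                 parsed_sentance = [{"word": word[0], "tag": word[1]}]
--
--             elif __check_if_word_tag_is_not_excluded(word[1]) or \
--                     __check_if_word_is_not_exception(word[0]):
--
--                 parsed_sentance.append({"word": word[0], "tag": word[1]})
--
--         parsed_sentences.append(parsed_sentance)
--     return parsed_sentences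
--
-- def __check_if_word_tag_is_not_excluded(tag):
--     included_tags = ("CC", "NN", "NNP", "NNPS", "VB", "VBD", "VBG", "VBP", "VBZ")
--     return True if tag in included_tags else False
--
-- def __check_if_word_is_not_exception(examined_word):
--     exceptions = {"IN": ("if",),
--                   "RB": ("otherwise",),
--                   "JJ": ("acceptable",)}
--
--     # TODO implement synonyms( path_similarity or synset)
--
--     for words in exceptions.values():
--         for word in words:
--             if examined_word.find(word) != -1:
--                 return True
--     return False
-- ===== SOURCE B (Python) =====
-- _INCLUDED = {"CC", "NN", "NNP", "NNPS", "VB", "VBD", "VBG", "VBP", "VBZ"}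
-- _EXCEPTION_SUBSTRINGS = ("if", "otherwise", "acceptable")
--
--
-- def _keep(word, tag):
--     return tag in _INCLUDED or any(s in word for s in _EXCEPTION_SUBSTRINGS)
--
--
-- def extract_important_words(sentences):
--     out = []
--     for sentence in sentences:
--         # split the sentence into segments: words before the first "and",
--         # then one segment per "and", each starting with its "and" word
--         segments = [[]]
--         for word in sentence:
--             if word[0] == "and":
--                 segments.append([word])
--             else:
--                 segments[-1].append(word)
--         first, *rest = segments
--         out.append([{"word": w, "tag": t} for (w, t) in first if _keep(w, t)])
--         for seg in rest:
--             group = [{"word": seg[0][0], "tag": seg[0][1]}]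
--             group.extend({"word": w, "tag": t} for (w, t) in seg[1:] if _keep(w, t))
--             out.append(group)
--     return out
-- ===== Notes on version B (the rewrite author's own statement) =====
-- stated objective: alternative
-- what changed: B first splits each sentence into 'and'-delimited segments, then renders each segment (first segment filtered, delimiter-led segments emit their 'and' head unconditionally then filter the rest), instead of A's single pass carrying a current-group accumulator that is flushed at each 'and'.
import Mathlib
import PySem

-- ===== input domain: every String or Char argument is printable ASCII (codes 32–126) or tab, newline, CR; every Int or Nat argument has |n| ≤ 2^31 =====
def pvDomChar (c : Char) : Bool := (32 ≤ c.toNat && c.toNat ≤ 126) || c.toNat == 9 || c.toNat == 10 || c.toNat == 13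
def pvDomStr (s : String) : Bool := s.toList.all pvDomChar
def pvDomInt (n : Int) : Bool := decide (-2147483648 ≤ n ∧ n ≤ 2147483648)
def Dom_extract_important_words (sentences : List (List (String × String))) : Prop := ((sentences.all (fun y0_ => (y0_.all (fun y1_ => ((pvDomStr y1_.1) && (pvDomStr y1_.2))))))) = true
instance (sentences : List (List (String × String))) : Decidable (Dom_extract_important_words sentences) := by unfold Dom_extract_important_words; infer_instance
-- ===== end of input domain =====

-- B splits each sentence into 'and'-delimited segments first and renders each segment
-- (alternative decomposition, same cost); equivalence of the return values is proved below.

-- ===== PORT A =====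
-- helper __check_if_word_tag_is_not_excluded
def aIncludedTags : List String := ["CC", "NN", "NNP", "NNPS", "VB", "VBD", "VBG", "VBP", "VBZ"]
def aTagNotExcluded (tag : String) : Bool := if aIncludedTags.contains tag then true else false
-- helper __check_if_word_is_not_exception: loop over exceptions.values(); early 'return True' = any
def aExceptionValues : List (List String) := [["if"], ["otherwise"], ["acceptable"]]
def aWordIsException (examined_word : String) : Bool :=
  aExceptionValues.any (fun words => words.any (fun word => PySem.Str.find examined_word word != -1))

-- the dict {"word": w, "tag": t} as an association list (shared literal, used by both ports)
def mkDict (word : String × String) : List (String × String) := [("word", word.1), ("tag", word.2)]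

def extract_important_words (sentences : List (List (String × String))) : List (List (List (String × String))) :=
  sentences.foldl (fun parsed_sentences sentence =>
    let st := sentence.foldl
      (fun (st : List (List (List (String × String))) × List (List (String × String))) word =>
        if word.1 == "and" then (st.1 ++ [st.2], [mkDict word])
        else if aTagNotExcluded word.2 || aWordIsException word.1 then (st.1, st.2 ++ [mkDict word])
        else st)
      (parsed_sentences, ([] : List (List (String × String))))
    st.1 ++ [st.2]) []

-- ===== PORT B =====
def bIncluded : PySem.Set String :=
  PySem.Set.ofList ["CC", "NN", "NNP", "NNPS", "VB", "VBD", "VBG", "VBP", "VBZ"]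
def bSubs : List String := ["if", "otherwise", "acceptable"]
def bKeep (word tag : String) : Bool :=
  bIncluded.contains tag || bSubs.any (fun s => PySem.Str.isIn s word)

-- segs[-1].append(word)
def bAppendLast {α : Type} (segs : List (List α)) (w : α) : List (List α) :=
  match segs with
  | [] => [[w]]          -- unreachable: segments starts as [[]]
  | [s] => [s ++ [w]]
  | s :: rest => s :: bAppendLast rest w

def bSegments (sentence : List (String × String)) : List (List (String × String)) :=
  sentence.foldl (fun segs w => if w.1 == "and" then segs ++ [[w]] else bAppendLast segs w) [[]]

-- the first-segment comprehension: kept words only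
def bRenderFirst (seg : List (String × String)) : List (List (String × String)) :=
  (seg.filter (fun p => bKeep p.1 p.2)).map mkDict
-- a delimiter-led segment: its 'and' head unconditionally, the rest filtered
def bRenderHeaded (seg : List (String × String)) : List (List (String × String)) :=
  match seg with
  | [] => []             -- unreachable: delimiter segments are nonempty
  | h :: t => mkDict h :: bRenderFirst t

def bProcessSentence (sentence : List (String × String)) : List (List (List (String × String))) :=
  match bSegments sentence with
  | [] => []             -- unreachable
  | first :: rest => bRenderFirst first :: rest.map bRenderHeaded

def extract_important_words_alt (sentences : List (List (String × String))) : List (List (List (String × String))) :=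
  sentences.foldl (fun out sentence => out ++ bProcessSentence sentence) []

-- ===== PRECONDITION & SPEC =====
def Spec_extract_important_words (sentences : List (List (String × String))) (out : List (List (List (String × String)))) : Prop := out = extract_important_words_alt sentences
instance (sentences : List (List (String × String))) (out : List (List (List (String × String)))) : Decidable (Spec_extract_important_words sentences out) := by unfold Spec_extract_important_words; infer_instance

-- ===== CLAIM (what is proved, stated in full; the proofs are below) =====
def Claim_equal_extract_important_words : Prop := ∀ (sentences : List (List (String × String))), Dom_extract_important_words sentences → Spec_extract_important_words sentences (extract_important_words sentences)

-- ===== LEMMAS AND PROOFS =====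

-- A's keep-condition equals B's keep-condition
theorem find_bne_eq_isIn (s sub : List Char) :
    (PySem.Chars.find s sub != -1) = PySem.Chars.isIn sub s := by
  rcases h : PySem.Chars.isIn sub s with _ | _
  · simp only [bne_eq_false_iff_eq]
    exact (PySem.Chars.find_eq_neg_one_iff s sub).mpr ((PySem.Chars.isIn_eq_false_iff sub s).mp h)
  · simp only [bne_iff_ne, ne_eq]
    exact (PySem.Chars.find_ne_neg_one_iff s sub).mpr ((PySem.Chars.isIn_iff_infix sub s).mp h)

-- A's keep-condition equals B's keep-condition
theorem keep_eq (w t : String) :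
    (aTagNotExcluded t || aWordIsException w) = bKeep w t := by
  have h1 : aTagNotExcluded t = bIncluded.contains t := by
    simp [aTagNotExcluded, bIncluded, aIncludedTags, PySem.Set.ofList, PySem.Set.contains]
  have h2 : aWordIsException w = bSubs.any (fun s => PySem.Str.isIn s w) := by
    simp [aWordIsException, aExceptionValues, bSubs, PySem.Str.find_eq, PySem.Str.isIn_eq,
      find_bne_eq_isIn]
  rw [h1, h2, bKeep]

-- A's inner loop as structural recursion on the word list
def aProc : List (String × String) → List (List (String × String)) →
    List (List (List (String × String))) × List (List (String × String))
  | [], cur => ([], cur)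
  | w :: ws, cur =>
    if w.1 == "and" then
      let r := aProc ws [mkDict w]
      (cur :: r.1, r.2)
    else if aTagNotExcluded w.2 || aWordIsException w.1 then aProc ws (cur ++ [mkDict w])
    else aProc ws cur

theorem aFold_eq (ws : List (String × String)) :
    ∀ (ps : List (List (List (String × String)))) (cur : List (List (String × String))),
    ws.foldl
      (fun (st : List (List (List (String × String))) × List (List (String × String))) word =>
        if word.1 == "and" then (st.1 ++ [st.2], [mkDict word])
        else if aTagNotExcluded word.2 || aWordIsException word.1 then (st.1, st.2 ++ [mkDict word])
        else st) (ps, cur)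
      = (ps ++ (aProc ws cur).1, (aProc ws cur).2) := by
  induction ws with
  | nil => intro ps cur; simp [aProc]
  | cons w ws ih =>
    intro ps cur
    simp only [List.foldl_cons, aProc]
    by_cases h1 : (w.1 == "and") = true
    · rw [if_pos h1, if_pos h1, ih]
      simp
    · rw [if_neg h1, if_neg h1]
      by_cases h2 : (aTagNotExcluded w.2 || aWordIsException w.1) = true
      · rw [if_pos h2, if_pos h2, ih]
      · rw [if_neg h2, if_neg h2, ih]

-- B's segment fold as structural recursion
def segRec : List (String × String) → List (String × String) → List (List (String × String))
  | [], cur => [cur]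
  | w :: ws, cur => if w.1 == "and" then cur :: segRec ws [w] else segRec ws (cur ++ [w])

theorem bAppendLast_eq {α : Type} (done : List (List α)) (cur : List α) (w : α) :
    bAppendLast (done ++ [cur]) w = done ++ [cur ++ [w]] := by
  induction done with
  | nil => rfl
  | cons d ds ih =>
    cases ds with
    | nil => rfl
    | cons e es =>
      calc bAppendLast ((d :: e :: es) ++ [cur]) w
          = d :: bAppendLast ((e :: es) ++ [cur]) w := rfl
        _ = d :: ((e :: es) ++ [cur ++ [w]]) := by rw [ih]
        _ = (d :: e :: es) ++ [cur ++ [w]] := rfl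

theorem bFold_eq (ws : List (String × String)) :
    ∀ (done : List (List (String × String))) (cur : List (String × String)),
    ws.foldl (fun segs w => if w.1 == "and" then segs ++ [[w]] else bAppendLast segs w)
        (done ++ [cur])
      = done ++ segRec ws cur := by
  induction ws with
  | nil => intro done cur; simp [segRec]
  | cons w ws ih =>
    intro done cur
    simp only [List.foldl_cons, segRec]
    by_cases h1 : (w.1 == "and") = true
    · rw [if_pos h1, if_pos h1, ih (done ++ [cur]) [w]]
      simp
    · rw [if_neg h1, if_neg h1, bAppendLast_eq]
      exact ih done (cur ++ [w])

theorem bRenderFirst_append (c : List (String × String)) (w : String × String) :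
    bRenderFirst (c ++ [w])
      = bRenderFirst c ++ (if bKeep w.1 w.2 then [mkDict w] else []) := by
  simp only [bRenderFirst, List.filter_append, List.map_append]
  split_ifs with h <;> simp [h]

theorem bRenderHeaded_append (c : List (String × String)) (hc : c ≠ []) (w : String × String) :
    bRenderHeaded (c ++ [w])
      = bRenderHeaded c ++ (if bKeep w.1 w.2 then [mkDict w] else []) := by
  cases c with
  | nil => exact absurd rfl hc
  | cons h t => simp [bRenderHeaded, bRenderFirst_append]

theorem aProc_headed (ws : List (String × String)) :
    ∀ (c : List (String × String)), c ≠ [] →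
    (aProc ws (bRenderHeaded c)).1 ++ [(aProc ws (bRenderHeaded c)).2]
      = (segRec ws c).map bRenderHeaded := by
  induction ws with
  | nil => intro c _; simp [aProc, segRec]
  | cons w ws ih =>
    intro c hc
    simp only [aProc, segRec]
    split_ifs with h1 h2
    · simp only [List.map_cons, List.cons_append, List.cons.injEq, true_and]
      have hrw : [mkDict w] = bRenderHeaded [w] := by simp [bRenderHeaded, bRenderFirst, mkDict, mkDict]
      rw [hrw]
      exact ih [w] (by simp)
    · have hk : bKeep w.1 w.2 = true := by rw [← keep_eq]; exact h2
      have : bRenderHeaded c ++ [mkDict w] = bRenderHeaded (c ++ [w]) := by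
        rw [bRenderHeaded_append c hc w, hk]; rfl
      rw [this]
      exact ih (c ++ [w]) (by simp)
    · have hk : bKeep w.1 w.2 = false := by rw [← keep_eq]; simpa using h2
      have : bRenderHeaded c = bRenderHeaded (c ++ [w]) := by
        rw [bRenderHeaded_append c hc w, hk]; simp
      rw [this]
      exact ih (c ++ [w]) (by simp)

theorem aProc_first (ws : List (String × String)) :
    ∀ (c : List (String × String)),
    (aProc ws (bRenderFirst c)).1 ++ [(aProc ws (bRenderFirst c)).2]
      = (match segRec ws c with
         | [] => []
         | first :: rest => bRenderFirst first :: rest.map bRenderHeaded) := by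
  induction ws with
  | nil => intro c; simp [aProc, segRec]
  | cons w ws ih =>
    intro c
    simp only [aProc, segRec]
    split_ifs with h1 h2
    · have hrw : [mkDict w] = bRenderHeaded [w] := by simp [bRenderHeaded, bRenderFirst, mkDict, mkDict]
      simp only [List.cons_append, hrw]
      rw [aProc_headed ws [w] (by simp)]
    · have hk : bKeep w.1 w.2 = true := by rw [← keep_eq]; exact h2
      have : bRenderFirst c ++ [mkDict w] = bRenderFirst (c ++ [w]) := by
        rw [bRenderFirst_append c w, hk]; rfl
      rw [this]; exact ih (c ++ [w])
    · have hk : bKeep w.1 w.2 = false := by rw [← keep_eq]; simpa using h2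
      have : bRenderFirst c = bRenderFirst (c ++ [w]) := by
        rw [bRenderFirst_append c w, hk]; simp
      rw [this]; exact ih (c ++ [w])

-- per-sentence: A's contribution equals B's
theorem sentence_eq (s : List (String × String)) (ps : List (List (List (String × String)))) :
    (let st := s.foldl
      (fun (st : List (List (List (String × String))) × List (List (String × String))) word =>
        if word.1 == "and" then (st.1 ++ [st.2], [mkDict word])
        else if aTagNotExcluded word.2 || aWordIsException word.1 then (st.1, st.2 ++ [mkDict word])
        else st) (ps, ([] : List (List (String × String))))
     st.1 ++ [st.2])
      = ps ++ bProcessSentence s := by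
  rw [aFold_eq]
  have hseg : bSegments s = segRec s [] := by
    have := bFold_eq s [] []
    simpa [bSegments] using this
  have hfirst : ([] : List (List (String × String))) = bRenderFirst [] := rfl
  simp only [List.append_assoc]
  congr 1
  rw [hfirst, aProc_first s []]
  simp [bProcessSentence, hseg]

-- ===== VERDICT (by name: the statement is the Claim_ definition above) =====
theorem extract_important_words_spec : Claim_equal_extract_important_words := by
  intro sentences _
  show extract_important_words sentences = extract_important_words_alt sentences
  simp only [extract_important_words, extract_important_words_alt]
  have : ∀ (ss : List (List (String × String))) (ps : List (List (List (String × String)))),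
      ss.foldl (fun parsed_sentences sentence =>
        let st := sentence.foldl
          (fun (st : List (List (List (String × String))) × List (List (String × String))) word =>
            if word.1 == "and" then (st.1 ++ [st.2], [mkDict word])
            else if aTagNotExcluded word.2 || aWordIsException word.1 then (st.1, st.2 ++ [mkDict word])
            else st) (parsed_sentences, ([] : List (List (String × String))))
        st.1 ++ [st.2]) ps
      = ss.foldl (fun out sentence => out ++ bProcessSentence sentence) ps := by
    intro ss
    induction ss with
    | nil => intro ps; rfl
    | cons s ss ih => intro ps; simp only [List.foldl_cons]; rw [sentence_eq s ps]; exact ih _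
  exact this sentences []
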